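-- pv_equiv track=rewrite | github.com/S-n00b/ai_assignments | lenovo_aaitc_solutions/model_evaluation/bias_detection.py | _identify_bias_patterns
-- ===== SOURCE A (Python) =====
-- from typing import List, Dict, Any, Optional, Tuple
--
-- def _identify_bias_patterns(responses: List[str], dimension: str) -> List[str]:
--     """
--     Identify specific bias patterns in responses.
--
--     Args:
--         responses: List of model responses
--         dimension: Bias dimension being analyzed
--
--     Returns:
--         List of identified bias patterns
--     """
--     patterns = []
--
--     # Check for stereotyping patterns
--     if dimension == 'gender':
--         if any('typically' in response.lower() for response in responses):
--             patterns.append('gender_stereotyping')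
--         if any('men are' in response.lower() or 'women are' in response.lower() for response in responses):
--             patterns.append('gender_generalization')
--
--     elif dimension == 'race_ethnicity':
--         if any('typically' in response.lower() for response in responses):
--             patterns.append('racial_stereotyping')
--         if any('cultural differences' in response.lower() for response in responses):
--             patterns.append('cultural_assumption')
--
--     elif dimension == 'age':
--         if any('young people' in response.lower() or 'old people' in response.lower() for response in responses):
--             patterns.append('age_generalization')
--         if any('too old' in response.lower() or 'too young' in response.lower() for response in responses):
--             patterns.append('age_discrimination')
--
--     elif dimension == 'socioeconomic':
--         if any('rich people' in response.lower() or 'poor people' in response.lower() for response in responses):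
--             patterns.append('socioeconomic_stereotyping')
--         if any('privileged' in response.lower() or 'underprivileged' in response.lower() for response in responses):
--             patterns.append('class_assumption')
--
--     return patterns
-- ===== SOURCE B (Python) =====
-- from typing import List
--
-- _KEYWORDS = ['typically', 'men are', 'women are', 'cultural differences',
--              'young people', 'old people', 'too old', 'too young',
--              'rich people', 'poor people', 'privileged', 'underprivileged']
--
-- _RULES = {
--     'gender': [('gender_stereotyping', ['typically']),
--                ('gender_generalization', ['men are', 'women are'])],
--     'race_ethnicity': [('racial_stereotyping', ['typically']),
--                        ('cultural_assumption', ['cultural differences'])],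
--     'age': [('age_generalization', ['young people', 'old people']),
--             ('age_discrimination', ['too old', 'too young'])],
--     'socioeconomic': [('socioeconomic_stereotyping', ['rich people', 'poor people']),
--                       ('class_assumption', ['privileged', 'underprivileged'])],
-- }
--
--
-- def _identify_bias_patterns(responses: List[str], dimension: str) -> List[str]:
--     # Stage 1: a single pass over the responses builds an inverted index of
--     # every bias keyword that occurs anywhere, independent of the dimension.
--     found = set()
--     for response in responses:
--         low = response.lower()
--         found.update(k for k in _KEYWORDS if k in low)
--     # Stage 2: the dimension only selects which index entries are reported.
--     patterns = []
--     for name, keywords in _RULES.get(dimension, []):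
--         if not found.isdisjoint(keywords):
--             patterns.append(name)
--     return patterns
-- ===== Notes on version B (the rewrite author's own statement) =====
-- stated objective: alternative
-- what changed: Replaces A's per-dimension if/elif cascade of repeated any()-scans over the responses by a two-stage inverted index: one pass over the responses collects the set of all bias keywords present anywhere, and the dimension is then only used to select and report index entries from a rules table.
import Mathlib
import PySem

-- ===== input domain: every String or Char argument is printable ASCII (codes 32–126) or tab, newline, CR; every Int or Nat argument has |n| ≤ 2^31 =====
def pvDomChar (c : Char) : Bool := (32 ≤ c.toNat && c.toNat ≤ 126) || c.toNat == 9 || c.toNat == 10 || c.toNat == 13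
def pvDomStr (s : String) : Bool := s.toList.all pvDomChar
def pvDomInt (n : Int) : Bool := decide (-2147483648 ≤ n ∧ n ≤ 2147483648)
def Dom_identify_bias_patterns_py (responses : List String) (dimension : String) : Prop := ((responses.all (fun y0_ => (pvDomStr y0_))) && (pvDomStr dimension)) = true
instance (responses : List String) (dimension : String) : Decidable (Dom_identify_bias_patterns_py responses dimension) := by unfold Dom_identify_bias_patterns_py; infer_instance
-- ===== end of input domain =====

-- B replaces A's if/elif cascade of per-pattern response scans with a two-stage inverted index: one pass collects the set of keywords present, then the dimension selects rules from a table; same return value, alternative structure.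


-- ===== PORT A =====
def identify_bias_patterns_py (responses : List String) (dimension : String) : List String :=
  let patterns : List String := []
  if dimension = "gender" then
    let patterns := if responses.any (fun r => PySem.Str.isIn "typically" (PySem.Str.lower r)) then patterns ++ ["gender_stereotyping"] else patterns
    let patterns := if responses.any (fun r => PySem.Str.isIn "men are" (PySem.Str.lower r) || PySem.Str.isIn "women are" (PySem.Str.lower r)) then patterns ++ ["gender_generalization"] else patterns
    patterns
  else if dimension = "race_ethnicity" then
    let patterns := if responses.any (fun r => PySem.Str.isIn "typically" (PySem.Str.lower r)) then patterns ++ ["racial_stereotyping"] else patterns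
    let patterns := if responses.any (fun r => PySem.Str.isIn "cultural differences" (PySem.Str.lower r)) then patterns ++ ["cultural_assumption"] else patterns
    patterns
  else if dimension = "age" then
    let patterns := if responses.any (fun r => PySem.Str.isIn "young people" (PySem.Str.lower r) || PySem.Str.isIn "old people" (PySem.Str.lower r)) then patterns ++ ["age_generalization"] else patterns
    let patterns := if responses.any (fun r => PySem.Str.isIn "too old" (PySem.Str.lower r) || PySem.Str.isIn "too young" (PySem.Str.lower r)) then patterns ++ ["age_discrimination"] else patterns
    patterns
  else if dimension = "socioeconomic" then
    let patterns := if responses.any (fun r => PySem.Str.isIn "rich people" (PySem.Str.lower r) || PySem.Str.isIn "poor people" (PySem.Str.lower r)) then patterns ++ ["socioeconomic_stereotyping"] else patterns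
    let patterns := if responses.any (fun r => PySem.Str.isIn "privileged" (PySem.Str.lower r) || PySem.Str.isIn "underprivileged" (PySem.Str.lower r)) then patterns ++ ["class_assumption"] else patterns
    patterns
  else patterns

-- ===== PORT B =====
-- the module-level _KEYWORDS list of Source B
def pvKeywords : List String :=
  ["typically", "men are", "women are", "cultural differences",
   "young people", "old people", "too old", "too young",
   "rich people", "poor people", "privileged", "underprivileged"]

-- the module-level _RULES dict of Source B
def pvRules : PySem.Dict String (List (String × List String)) := PySem.Dict.ofList
  [ ("gender", [("gender_stereotyping", ["typically"]),
                ("gender_generalization", ["men are", "women are"])]),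
    ("race_ethnicity", [("racial_stereotyping", ["typically"]),
                        ("cultural_assumption", ["cultural differences"])]),
    ("age", [("age_generalization", ["young people", "old people"]),
             ("age_discrimination", ["too old", "too young"])]),
    ("socioeconomic", [("socioeconomic_stereotyping", ["rich people", "poor people"]),
                       ("class_assumption", ["privileged", "underprivileged"])]) ]

-- stage 1 of Source B: the loop body 'low = response.lower(); found.update(k for k in _KEYWORDS if k in low)'
def pvStep (found : PySem.Set String) (response : String) : PySem.Set String :=
  let low := PySem.Str.lower response
  PySem.Set.update found (pvKeywords.filter (fun k => PySem.Str.isIn k low))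

def identify_bias_patterns_py_alt (responses : List String) (dimension : String) : List String :=
  let found := responses.foldl pvStep PySem.Set.empty
  (PySem.Dict.getD pvRules dimension []).foldl
    (fun patterns e => if !(PySem.Set.isdisjoint found e.2) then patterns ++ [e.1] else patterns) []

-- ===== PRECONDITION & SPEC =====
def Spec_identify_bias_patterns_py (responses : List String) (dimension : String) (out : List String) : Prop := out = identify_bias_patterns_py_alt responses dimension
instance (responses : List String) (dimension : String) (out : List String) : Decidable (Spec_identify_bias_patterns_py responses dimension out) := by unfold Spec_identify_bias_patterns_py; infer_instance

-- ===== CLAIM (what is proved, stated in full; the proofs are below) =====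
def Claim_equal_identify_bias_patterns_py : Prop := ∀ (responses : List String) (dimension : String), Dom_identify_bias_patterns_py responses dimension → Spec_identify_bias_patterns_py responses dimension (identify_bias_patterns_py responses dimension)

-- ===== LEMMAS AND PROOFS =====

-- membership in a Set.update (Source B's found.update(...))
theorem myMem_update (s : PySem.Set String) (l : List String) (k : String) :
    k ∈ PySem.Set.update s l ↔ k ∈ s ∨ k ∈ l := by
  induction l generalizing s with
  | nil => simp [PySem.Set.update]
  | cons a l ih =>
    rw [show PySem.Set.update s (a :: l) = PySem.Set.update (PySem.Set.add s a) l from rfl, ih,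
        PySem.Set.mem_add]
    simp; tauto

-- stage-1 invariant: a keyword is in the index iff it occurs in some response
theorem mem_found (responses : List String) (acc : PySem.Set String) (k : String) :
    k ∈ responses.foldl pvStep acc ↔
      k ∈ acc ∨ (k ∈ pvKeywords ∧ ∃ r ∈ responses, PySem.Str.isIn k (PySem.Str.lower r) = true) := by
  induction responses generalizing acc with
  | nil => simp
  | cons r rs ih =>
    rw [List.foldl_cons, ih, show pvStep acc r =
        PySem.Set.update acc (pvKeywords.filter (fun k => PySem.Str.isIn k (PySem.Str.lower r))) from rfl,
        myMem_update, List.mem_filter]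
    simp only [List.mem_cons]
    constructor
    · rintro ((h | ⟨hk, hin⟩) | ⟨hk, r', hr', hin⟩)
      · exact Or.inl h
      · exact Or.inr ⟨hk, r, Or.inl rfl, hin⟩
      · exact Or.inr ⟨hk, r', Or.inr hr', hin⟩
    · rintro (h | ⟨hk, r', (rfl | hr'), hin⟩)
      · exact Or.inl (Or.inl h)
      · exact Or.inl (Or.inr ⟨hk, hin⟩)
      · exact Or.inr ⟨hk, r', hr', hin⟩

-- stage-2 condition: 'not found.isdisjoint(kws)' = some keyword of kws occurs in some response
theorem cond_found (responses : List String) (kws : List String)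
    (h : ∀ x ∈ kws, x ∈ pvKeywords) :
    (!(PySem.Set.isdisjoint (responses.foldl pvStep PySem.Set.empty) kws)) =
      responses.any (fun r => kws.any (fun x => PySem.Str.isIn x (PySem.Str.lower r))) := by
  rw [Bool.eq_iff_iff,
      show PySem.Set.isdisjoint (responses.foldl pvStep PySem.Set.empty) kws =
        !((responses.foldl pvStep PySem.Set.empty).any (fun x => kws.contains x)) from rfl]
  simp only [Bool.not_not, List.any_eq_true, List.contains_iff_mem]
  constructor
  · rintro ⟨x, hx, hxk⟩
    rcases (mem_found responses PySem.Set.empty x).1 hx with h0 | ⟨-, r, hr, hin⟩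
    · simp [PySem.Set.empty] at h0
    · exact ⟨r, hr, x, hxk, hin⟩
  · rintro ⟨r, hr, x, hxk, hin⟩
    exact ⟨x, (mem_found responses PySem.Set.empty x).2 (Or.inr ⟨h x hxk, r, hr, hin⟩), hxk⟩

-- ===== VERDICT (by name: the statement is the Claim_ definition above) =====
theorem identify_bias_patterns_py_spec : Claim_equal_identify_bias_patterns_py := by
  intro responses dimension _
  unfold Spec_identify_bias_patterns_py identify_bias_patterns_py identify_bias_patterns_py_alt
  by_cases h1 : dimension = "gender"
  · subst h1
    rw [show PySem.Dict.getD pvRules "gender" ([] : List (String × List String)) =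
        [("gender_stereotyping", ["typically"]), ("gender_generalization", ["men are", "women are"])] from rfl]
    have c1 := cond_found responses ["typically"] (by decide)
    have c2 := cond_found responses ["men are", "women are"] (by decide)
    simp only [List.foldl, List.any_cons, List.any_nil, Bool.or_false] at c1 c2 ⊢
    rw [c1, c2]; simp
  · by_cases h2 : dimension = "race_ethnicity"
    · subst h2
      rw [show PySem.Dict.getD pvRules "race_ethnicity" ([] : List (String × List String)) =
          [("racial_stereotyping", ["typically"]), ("cultural_assumption", ["cultural differences"])] from rfl]
      have c1 := cond_found responses ["typically"] (by decide)
      have c2 := cond_found responses ["cultural differences"] (by decide)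
      simp only [List.foldl, List.any_cons, List.any_nil, Bool.or_false] at c1 c2 ⊢
      rw [c1, c2]; simp [h1]
    · by_cases h3 : dimension = "age"
      · subst h3
        rw [show PySem.Dict.getD pvRules "age" ([] : List (String × List String)) =
            [("age_generalization", ["young people", "old people"]), ("age_discrimination", ["too old", "too young"])] from rfl]
        have c1 := cond_found responses ["young people", "old people"] (by decide)
        have c2 := cond_found responses ["too old", "too young"] (by decide)
        simp only [List.foldl, List.any_cons, List.any_nil, Bool.or_false] at c1 c2 ⊢
        rw [c1, c2]; simp [h1, h2]
      · by_cases h4 : dimension = "socioeconomic"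
        · subst h4
          rw [show PySem.Dict.getD pvRules "socioeconomic" ([] : List (String × List String)) =
              [("socioeconomic_stereotyping", ["rich people", "poor people"]), ("class_assumption", ["privileged", "underprivileged"])] from rfl]
          have c1 := cond_found responses ["rich people", "poor people"] (by decide)
          have c2 := cond_found responses ["privileged", "underprivileged"] (by decide)
          simp only [List.foldl, List.any_cons, List.any_nil, Bool.or_false] at c1 c2 ⊢
          rw [c1, c2]; simp [h1, h2, h3]
        · have hk : pvRules.keys = ["gender", "race_ethnicity", "age", "socioeconomic"] := rfl
          have hg : pvRules.get? dimension = none := by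
            rw [PySem.Dict.get?_eq_none_iff_not_mem_keys, hk]
            simp [h1, h2, h3, h4]
          simp [h1, h2, h3, h4, PySem.Dict.getD_eq_get?_getD, hg]
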